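-- pv_equiv track=rewrite | github.com/kevindtbd/overplanned | services/api/models/arbitration.py | _blend_rankings
-- ===== SOURCE A (Python) =====
-- def _blend_rankings(
--     ml_rankings: list[str],
--     llm_rankings: list[str],
-- ) -> list[str]:
--     """
--     Interleave ML and LLM rankings, deduplicating.
--
--     Pattern: [ml[0], llm[0], ml[1], llm[1], ...]
--     """
--     seen: set[str] = set()
--     blended: list[str] = []
--     max_len = max(len(ml_rankings), len(llm_rankings))
--
--     for i in range(max_len):
--         if i < len(ml_rankings) and ml_rankings[i] not in seen:
--             blended.append(ml_rankings[i])
--             seen.add(ml_rankings[i])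
--         if i < len(llm_rankings) and llm_rankings[i] not in seen:
--             blended.append(llm_rankings[i])
--             seen.add(llm_rankings[i])
--
--     return blended
-- ===== SOURCE B (Python) =====
-- def _blend_rankings(
--     ml_rankings: list[str],
--     llm_rankings: list[str],
-- ) -> list[str]:
--     """Interleave then dedup, as two separate passes."""
--     interleaved = [x for pair in zip(ml_rankings, llm_rankings) for x in pair]
--     longer = ml_rankings if len(llm_rankings) <= len(ml_rankings) else llm_rankings
--     interleaved += longer[min(len(ml_rankings), len(llm_rankings)):]
--     return list(dict.fromkeys(interleaved))
-- ===== Notes on version B (the rewrite author's own statement) =====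
-- stated objective: idiomatic
-- what changed: Replaced the index-guarded single loop with explicit seen-set bookkeeping by two separate passes: build the interleaved sequence (zip of the common prefix plus the tail of the longer list), then dedup it with dict.fromkeys preserving first occurrence.
import Mathlib
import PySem

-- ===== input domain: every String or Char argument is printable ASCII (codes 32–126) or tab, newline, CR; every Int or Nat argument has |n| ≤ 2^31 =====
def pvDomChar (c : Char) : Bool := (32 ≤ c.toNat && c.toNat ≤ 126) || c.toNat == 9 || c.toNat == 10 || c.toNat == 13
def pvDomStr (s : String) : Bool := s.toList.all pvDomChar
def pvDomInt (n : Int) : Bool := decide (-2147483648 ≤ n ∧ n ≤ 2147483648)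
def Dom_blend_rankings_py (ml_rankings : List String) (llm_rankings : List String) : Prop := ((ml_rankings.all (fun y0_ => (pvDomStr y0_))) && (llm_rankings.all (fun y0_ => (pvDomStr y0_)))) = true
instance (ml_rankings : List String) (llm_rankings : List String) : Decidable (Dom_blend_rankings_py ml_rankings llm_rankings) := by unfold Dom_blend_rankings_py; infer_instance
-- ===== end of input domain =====

-- ===== PORT A =====
-- B changes: interleave and deduplicate as two separate passes (zip + dict.fromkeys) instead of one index-guarded loop with a seen set (objective: idiomatic).
-- loop body of A: one iteration of 'for i in range(max_len)'; state = (seen, blended)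
def blendStepA (ml_rankings : List String) (llm_rankings : List String)
    (st : PySem.Set String × List String) (i : Int) : PySem.Set String × List String :=
  let st :=
    if i < (ml_rankings.length : Int) ∧ PySem.Set.contains st.1 (PySem.List.pyGetD ml_rankings i "") = false then
      (PySem.Set.add st.1 (PySem.List.pyGetD ml_rankings i ""), st.2 ++ [PySem.List.pyGetD ml_rankings i ""])
    else st
  if i < (llm_rankings.length : Int) ∧ PySem.Set.contains st.1 (PySem.List.pyGetD llm_rankings i "") = false then
    (PySem.Set.add st.1 (PySem.List.pyGetD llm_rankings i ""), st.2 ++ [PySem.List.pyGetD llm_rankings i ""])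
  else st

def blend_rankings_py (ml_rankings : List String) (llm_rankings : List String) : List String :=
  let max_len : Nat := max ml_rankings.length llm_rankings.length
  ((PySem.List.pyRange 0 (max_len : Int) 1).foldl (blendStepA ml_rankings llm_rankings)
    (PySem.Set.empty, [])).2

-- ===== PORT B =====
def blend_rankings_py_alt (ml_rankings : List String) (llm_rankings : List String) : List String :=
  let interleaved := (ml_rankings.zip llm_rankings).flatMap (fun pair => [pair.1, pair.2])
  let longer := if llm_rankings.length ≤ ml_rankings.length then ml_rankings else llm_rankings
  let interleaved := interleaved ++
    PySem.List.slice longer (some ((min ml_rankings.length llm_rankings.length : Nat) : Int)) none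
  PySem.List.dedup interleaved

-- ===== PRECONDITION & SPEC =====
def Spec_blend_rankings_py (ml_rankings : List String) (llm_rankings : List String) (out : List String) : Prop := out = blend_rankings_py_alt ml_rankings llm_rankings
instance (ml_rankings : List String) (llm_rankings : List String) (out : List String) : Decidable (Spec_blend_rankings_py ml_rankings llm_rankings out) := by unfold Spec_blend_rankings_py; infer_instance

-- ===== CLAIM (what is proved, stated in full; the proofs are below) =====
def Claim_equal_blend_rankings_py : Prop := ∀ (ml_rankings : List String) (llm_rankings : List String), Dom_blend_rankings_py ml_rankings llm_rankings → Spec_blend_rankings_py ml_rankings llm_rankings (blend_rankings_py ml_rankings llm_rankings)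

-- ===== LEMMAS AND PROOFS =====

-- proof-side view of A's loop body acting on the seen set alone
def pvStep (ml llm : List String) (s : PySem.Set String) (i : Int) : PySem.Set String :=
  let s := if i < (ml.length : Int) then PySem.Set.add s (PySem.List.pyGetD ml i "") else s
  if i < (llm.length : Int) then PySem.Set.add s (PySem.List.pyGetD llm i "") else s

-- the interleaving both programs realise
def pvInterleave : List String → List String → List String
  | [], ys => ys
  | xs, [] => xs
  | x :: xs, y :: ys => x :: y :: pvInterleave xs ys

lemma pv_step_pair (ml llm : List String) (s : PySem.Set String) (i : Int) :
    blendStepA ml llm (s, (s : List String)) i = (pvStep ml llm s i, pvStep ml llm s i) := by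
  unfold blendStepA pvStep
  simp only [PySem.Set.add]
  split_ifs <;> simp_all

lemma pv_fold_pair (ml llm : List String) (l : List Int) (s : PySem.Set String) :
    l.foldl (blendStepA ml llm) (s, (s : List String))
      = (l.foldl (pvStep ml llm) s, l.foldl (pvStep ml llm) s) := by
  induction l generalizing s with
  | nil => rfl
  | cons i l ih => simp only [List.foldl_cons, pv_step_pair, ih]

lemma pv_step_shift (ml llm : List String) (s : PySem.Set String) (k : Nat) :
    pvStep ml llm s (1 + (k : Int)) = pvStep ml.tail llm.tail s k := by
  have hml : ∀ (xs : List String) (s : PySem.Set String),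
      (if (1 + (k : Int)) < (xs.length : Int) then PySem.Set.add s (PySem.List.pyGetD xs (1 + (k : Int)) "") else s)
        = (if (k : Int) < (xs.tail.length : Int) then PySem.Set.add s (PySem.List.pyGetD xs.tail (k : Int) "") else s) := by
    intro xs s
    cases xs with
    | nil =>
      rw [if_neg (by simp only [List.length_nil, Nat.cast_zero]; omega), if_neg (by simp only [List.tail_nil, List.length_nil, Nat.cast_zero]; omega)]
    | cons x xs =>
      have h1 : ((1 : Int) + (k : Int)) = ((k + 1 : Nat) : Int) := by push_cast; ring
      have h2 : ((1 + (k : Int)) < ((x :: xs).length : Int)) ↔ ((k : Int) < (xs.length : Int)) := by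
        simp; omega
      rw [h1]
      simp only [PySem.List.pyGetD_natCast, List.tail_cons, List.length_cons]
      have h3 : (x :: xs).getD (k + 1) "" = xs.getD k "" := by simp [List.getD]
      rw [h3]
      by_cases h : (k : Int) < (xs.length : Int)
      · rw [if_pos (by exact_mod_cast (by omega : ((k:Int) + 1) < ((xs.length : Int) + 1))), if_pos h]
      · rw [if_neg (by push_cast; omega), if_neg h]
  unfold pvStep
  rw [hml ml s]
  rw [hml llm]

lemma pv_fold_shift (ml llm : List String) (n : Nat) (s : PySem.Set String) :
    (PySem.List.pyRange 1 ((n : Int) + 1) 1).foldl (pvStep ml llm) s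
      = (PySem.List.pyRange 0 (n : Int) 1).foldl (pvStep ml.tail llm.tail) s := by
  rw [PySem.List.pyRange_one 1 ((n : Int) + 1), PySem.List.pyRange_one 0 (n : Int)]
  have h1 : (((n : Int) + 1) - 1).toNat = n := by omega
  have h2 : ((n : Int) - 0).toNat = n := by omega
  rw [h1, h2, List.foldl_map, List.foldl_map]
  induction (List.range n) generalizing s with
  | nil => rfl
  | cons k l ih =>
    simp only [List.foldl_cons]
    rw [pv_step_shift]
    rw [ih]
    congr 1
    simp

lemma pv_core (n : Nat) : ∀ (ml llm : List String), max ml.length llm.length = n →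
    ∀ (s : PySem.Set String),
      (PySem.List.pyRange 0 (n : Int) 1).foldl (pvStep ml llm) s
        = (pvInterleave ml llm).foldl PySem.Set.add s := by
  induction n with
  | zero =>
    intro ml llm h s
    have hml : ml = [] := by cases ml <;> simp_all
    have hllm : llm = [] := by cases llm <;> simp_all
    subst hml; subst hllm
    rfl
  | succ n ih =>
    intro ml llm h s
    have hpos : (0 : Int) < ((n + 1 : Nat) : Int) := by positivity
    have hcast : ((n + 1 : Nat) : Int) = (n : Int) + 1 := by push_cast; ring
    rw [hcast] at hpos ⊢
    rw [PySem.List.pyRange_one_cons hpos, List.foldl_cons, zero_add, pv_fold_shift]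
    cases ml with
    | nil =>
      cases llm with
      | nil => simp at h
      | cons y ys =>
        have hy : pvStep [] (y :: ys) s 0 = PySem.Set.add s y := by
          simp [pvStep, PySem.List.pyGetD_zero_cons]
        rw [hy]
        simp only [List.tail_nil, List.tail_cons]
        rw [ih [] ys (by simp at h ⊢; omega) (PySem.Set.add s y)]
        rfl
    | cons x xs =>
      cases llm with
      | nil =>
        have hx : pvStep (x :: xs) [] s 0 = PySem.Set.add s x := by
          simp [pvStep, PySem.List.pyGetD_zero_cons]
        rw [hx]
        simp only [List.tail_nil, List.tail_cons]
        rw [ih xs [] (by simp at h ⊢; omega) (PySem.Set.add s x)]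
        have hxs : pvInterleave xs [] = xs := by cases xs <;> rfl
        rw [hxs]
        rfl
      | cons y ys =>
        have hxy : pvStep (x :: xs) (y :: ys) s 0 = PySem.Set.add (PySem.Set.add s x) y := by
          simp [pvStep, PySem.List.pyGetD_zero_cons]
        rw [hxy]
        simp only [List.tail_cons]
        rw [ih xs ys (by simp at h ⊢; omega) (PySem.Set.add (PySem.Set.add s x) y)]
        rfl

lemma pv_interB (ml llm : List String) :
    ((ml.zip llm).flatMap (fun pair => [pair.1, pair.2])) ++
      PySem.List.slice (if llm.length ≤ ml.length then ml else llm)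
        (some ((min ml.length llm.length : Nat) : Int)) none
      = pvInterleave ml llm := by
  induction ml generalizing llm with
  | nil =>
    cases llm with
    | nil => rfl
    | cons y ys =>
      simp [pvInterleave]
  | cons x xs ih =>
    cases llm with
    | nil =>
      simp [pvInterleave]
    | cons y ys =>
      have hmin : (min (x :: xs).length (y :: ys).length : Nat) = (min xs.length ys.length) + 1 := by
        simp [Nat.succ_min_succ]
      have hif : (if (y :: ys).length ≤ (x :: xs).length then (x :: xs) else (y :: ys))
          = (if ys.length ≤ xs.length then xs else ys).cons (if ys.length ≤ xs.length then x else y) := by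
        by_cases h : ys.length ≤ xs.length <;> simp [h]
      rw [hmin, hif]
      have hslice : ∀ (z : String) (zs : List String) (m : Nat),
          PySem.List.slice (zs.cons z) (some ((m + 1 : Nat) : Int)) none = PySem.List.slice zs (some ((m : Nat) : Int)) none := by
        intro z zs m
        rw [PySem.List.slice_from_natCast, PySem.List.slice_from_natCast]
        rfl
      rw [hslice]
      show x :: y :: (((xs.zip ys).flatMap (fun pair => [pair.1, pair.2])) ++ _) = _
      rw [ih ys]
      rfl


-- ===== VERDICT (by name: the statement is the Claim_ definition above) =====
theorem blend_rankings_py_spec : Claim_equal_blend_rankings_py := by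
  intro ml llm _
  show blend_rankings_py ml llm = blend_rankings_py_alt ml llm
  unfold blend_rankings_py blend_rankings_py_alt
  dsimp only
  rw [pv_interB ml llm]
  have h0 : (PySem.Set.empty : PySem.Set String) = ([] : List String) := rfl
  rw [h0, pv_fold_pair ml llm _ []]
  rw [pv_core (max ml.length llm.length) ml llm rfl []]
  rw [PySem.List.dedup_eq_ofList, PySem.Set.ofList_eq_foldl]
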